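-- pv_equiv track=rewrite | github.com/Code-R-xplorer/Advent-Of-Code-2024 | src/Day_09.py | move_right_values_to_left
-- ===== SOURCE A (Python) =====
-- def move_right_values_to_left(array):
--     new_array = array
--     write_index = 0
--     read_index = len(array) - 1
--     total_writes_needed = sum(x is not None for x in new_array)
--     while write_index < total_writes_needed:
--         if new_array[write_index] is not None:
--             write_index += 1
--         else:
--             if array[read_index] is not None:
--                 new_array[write_index] = array[read_index]
--                 new_array[read_index] = None
--                 write_index += 1
--                 read_index -= 1
--             else:
--                 read_index -= 1
--     return new_array
-- ===== SOURCE B (Python) =====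
-- def move_right_values_to_left(array):
--     n = len(array)
--     total = sum(x is not None for x in array)
--     fillers = [array[i] for i in range(n - 1, total - 1, -1) if array[i] is not None]
--     for i in range(total, n):
--         array[i] = None
--     it = iter(fillers)
--     for write in range(total):
--         if array[write] is None:
--             array[write] = next(it)
--     return array
-- ===== Notes on version B (the rewrite author's own statement) =====
-- stated objective: alternative
-- what changed: Replaces A's single interleaved two-pointer while-loop by a three-phase decomposition: count the non-None values, collect the fillers by one right-to-left scan of the tail, blank the tail, then one left-to-right pass over the prefix consuming fillers from an iterator.
import Mathlib
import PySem

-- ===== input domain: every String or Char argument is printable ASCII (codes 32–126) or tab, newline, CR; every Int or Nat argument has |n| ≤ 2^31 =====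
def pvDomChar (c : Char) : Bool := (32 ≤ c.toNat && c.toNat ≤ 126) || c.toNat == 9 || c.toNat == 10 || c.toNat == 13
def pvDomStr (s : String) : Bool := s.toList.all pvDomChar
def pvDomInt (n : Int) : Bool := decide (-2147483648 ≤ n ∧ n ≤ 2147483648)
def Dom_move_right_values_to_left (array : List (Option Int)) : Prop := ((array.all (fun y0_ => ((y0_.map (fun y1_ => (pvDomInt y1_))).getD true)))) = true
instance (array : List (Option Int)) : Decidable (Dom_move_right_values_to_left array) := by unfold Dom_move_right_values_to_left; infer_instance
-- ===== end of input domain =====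

-- B replaces A's interleaved two-pointer while-loop by a three-phase decomposition
-- (count, collect fillers right-to-left, blank the tail, fill the prefix); objective: alternative.
-- Python A and B mutate `array` in place; the equivalence proved here is about the return value.

-- ===== PORT A =====
-- the while loop: state (arr, write_index, read_index); total is fixed; fuel only
-- makes the recursion total (2*len+1 always suffices, proved below); the `none`
-- branches of the index matches are IndexError cases the Python never reaches.
def pvALoop (arr : List (Option Int)) (w r total : Int) : Nat → List (Option Int)
  | 0 => arr
  | fuel+1 =>
    if w < total then
      match PySem.List.pyGet? arr w with
      | none => arr
      | some (some x) => pvALoop arr (w+1) r total fuel  -- new_array[write_index] is not None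
      | some none =>
        match PySem.List.pyGet? arr r with
        | none => arr
        | some (some v) =>
            pvALoop ((PySem.List.pySetD (PySem.List.pySetD arr w (some v)) r none))
              (w+1) (r-1) total fuel
        | some none => pvALoop arr w (r-1) total fuel
    else arr

def move_right_values_to_left (array : List (Option Int)) : List (Option Int) :=
  let total : Int := array.countP (fun x => x.isSome)   -- sum(x is not None for x in new_array)
  pvALoop array 0 ((array.length : Int) - 1) total (2 * array.length + 1)

-- ===== PORT B =====
-- the final fill loop of Source B: walk the prefix, replace each None by the next filler;
-- the `[]` case with a None head is the unreachable StopIteration.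
def pvFill : List (Option Int) → List (Option Int) → List (Option Int)
  | [], _ => []
  | some x :: xs, fs => some x :: pvFill xs fs
  | none :: xs, f :: fs => f :: pvFill xs fs
  | none :: xs, [] => none :: pvFill xs []

def move_right_values_to_left_alt (array : List (Option Int)) : List (Option Int) :=
  let n := array.length
  let total := array.countP (fun x => x.isSome)
  -- fillers = [array[i] for i in range(n-1, total-1, -1) if array[i] is not None]
  let fillers := ((array.drop total).reverse).filter (fun x => x.isSome)
  -- for i in range(total, n): array[i] = None  — then fill the prefix
  pvFill (array.take total) fillers ++ List.replicate (n - total) none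

-- ===== PRECONDITION & SPEC =====
def Spec_move_right_values_to_left (array : List (Option Int)) (out : List (Option Int)) : Prop := out = move_right_values_to_left_alt array
instance (array : List (Option Int)) (out : List (Option Int)) : Decidable (Spec_move_right_values_to_left array out) := by unfold Spec_move_right_values_to_left; infer_instance

-- ===== CLAIM (what is proved, stated in full; the proofs are below) =====
def Claim_equal_move_right_values_to_left : Prop := ∀ (array : List (Option Int)), Dom_move_right_values_to_left array → Spec_move_right_values_to_left array (move_right_values_to_left array)

-- ===== LEMMAS AND PROOFS =====

-- fill with no fillers copies an all-isSome list
lemma pvFill_nil (xs : List (Option Int)) (h : ∀ x ∈ xs, x.isSome) : pvFill xs [] = xs := by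
  induction xs with
  | nil => rfl
  | cons a xs ih =>
    cases a with
    | none => exact absurd (h none (by simp)) (by simp)
    | some v => simp [pvFill, ih (fun x hx => h x (by simp [hx]))]

-- setting the first None to an isSome value is the same as prepending that value to the fillers
lemma pvFill_set (xs : List (Option Int)) (w : Nat) (v : Int) (fs : List (Option Int))
    (hw : w < xs.length) (hnone : xs[w] = none)
    (hpre : ∀ i : Nat, (hi : i < xs.length) → i < w → (xs[i]).isSome) :
    pvFill (xs.set w (some v)) fs = pvFill xs (some v :: fs) := by
  induction xs generalizing w with
  | nil => simp at hw
  | cons a xs ih =>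
    cases w with
    | zero =>
      simp at hnone; subst hnone
      simp [pvFill]
    | succ w =>
      have ha : a.isSome := hpre 0 (by simp) (by omega)
      obtain ⟨x, hx⟩ := Option.isSome_iff_exists.mp ha
      subst hx
      simp only [List.set_cons_succ, pvFill]
      congr 1
      exact ih w (by simpa using hw) (by simpa using hnone)
        (fun i hi hlt => by simpa using hpre (i+1) (by simpa using Nat.succ_lt_succ hi) (by omega))

-- an all-isSome prefix of full count forces an all-none tail, and then B is the identity
lemma alt_fixed (arr : List (Option Int))
    (hpre : ∀ i : Nat, (hi : i < arr.length) → i < arr.countP (fun x => x.isSome) → (arr[i]).isSome) :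
    move_right_values_to_left_alt arr = arr := by
  set t := arr.countP (fun x => x.isSome) with ht
  have htlen : t ≤ arr.length := ht ▸ List.countP_le_length
  have hsplit : arr.countP (fun x => x.isSome) =
      (arr.take t).countP (fun x => x.isSome) + (arr.drop t).countP (fun x => x.isSome) := by
    conv_lhs => rw [← List.take_append_drop t arr]
    exact List.countP_append
  have htake : ∀ x ∈ arr.take t, x.isSome := by
    intro x hx
    obtain ⟨i, hi, hx'⟩ := List.mem_iff_getElem.mp hx
    have hi' : i < arr.length := lt_of_lt_of_le (lt_of_lt_of_le hi (by simp)) (le_refl _)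
    have : i < t := by simpa [htlen] using hi
    have := hpre i (by omega) this
    simpa [List.getElem_take] using hx' ▸ (by simpa [List.getElem_take] using this)
  have htc : (arr.take t).countP (fun x => x.isSome) = (arr.take t).length :=
    List.countP_eq_length.mpr htake
  have hdrop0 : (arr.drop t).countP (fun x => x.isSome) = 0 := by
    have hl : (arr.take t).length = t := by simp [htlen]
    omega
  have hdropnone : ∀ x ∈ arr.drop t, x = none := by
    intro x hx
    have := (List.countP_eq_zero.mp hdrop0) x hx
    cases x with
    | none => rfl
    | some v => simp at this
  unfold move_right_values_to_left_alt
  simp only [← ht]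
  have hfill : ((arr.drop t).reverse).filter (fun x => x.isSome) = [] := by
    apply List.filter_eq_nil_iff.mpr
    intro x hx
    have := hdropnone x (by simpa using hx)
    simp [this]
  rw [hfill, pvFill_nil _ htake]
  have hrep : List.replicate (arr.length - t) (none : Option Int) = arr.drop t :=
    (List.eq_replicate_iff.mpr ⟨by simp, hdropnone⟩).symm
  rw [hrep, List.take_append_drop]

-- the key invariance: one move step of A does not change B's value
lemma alt_move (arr : List (Option Int)) (w r : Nat) (v : Int)
    (hw : w < arr.countP (fun x => x.isSome))
    (hr1 : arr.countP (fun x => x.isSome) ≤ r) (hr2 : r < arr.length)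
    (hwnone : arr[w]'(by have := @List.countP_le_length _ (fun x : Option Int => x.isSome) arr; omega) = none)
    (hrv : arr[r] = some v)
    (hpre : ∀ i : Nat, (hi : i < arr.length) → i < w → (arr[i]).isSome)
    (hsuf : ∀ i : Nat, (hi : i < arr.length) → r < i → arr[i] = none) :
    move_right_values_to_left_alt ((arr.set w (some v)).set r none) = move_right_values_to_left_alt arr := by
  have hlen := @List.countP_le_length _ (fun x : Option Int => x.isSome) arr
  set t := arr.countP (fun x => x.isSome) with ht
  have hwlen : w < arr.length := by omega
  have hwr : w < r := by omega
  set arr2 := (arr.set w (some v)).set r none with harr2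
  have hlen2 : arr2.length = arr.length := by simp [harr2]
  have hcount2 : arr2.countP (fun x => x.isSome) = t := by
    rw [harr2, List.countP_set (by simpa using hr2), List.countP_set hwlen]
    simp [hwnone, List.getElem_set, (by omega : w ≠ r).symm, hrv]
    omega
  -- take t of arr2 = (take t arr).set w (some v)
  have htake2 : arr2.take t = (arr.take t).set w (some v) := by
    rw [harr2, List.take_set, List.take_set]
    rw [List.set_eq_of_length_le (by simp; omega)]
  -- drop t arr2 = (drop t arr).set (r - t) none
  have hdrop2 : arr2.drop t = (arr.drop t).set (r - t) none := by
    rw [harr2, List.drop_set, List.drop_set]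
    simp only [if_neg (by omega : ¬ r < t), if_pos (by omega : w < t)]
  -- decompose drop t arr = M ++ some v :: N with N all none
  set M := (arr.drop t).take (r - t) with hM
  set N := arr.drop (r + 1) with hN
  have hdecomp : arr.drop t = M ++ some v :: N := by
    rw [hM, hN]
    conv_lhs => rw [← List.take_append_drop (r - t) (arr.drop t)]
    congr 1
    rw [List.drop_drop, (by omega : t + (r - t) = r), List.drop_eq_getElem_cons hr2, hrv]
  have hMlen : M.length = r - t := by
    rw [hM]; simp; omega
  have hNnone : ∀ x ∈ N, x = none := by
    intro x hx
    rw [hN] at hx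
    obtain ⟨i, hi, hx'⟩ := List.mem_iff_getElem.mp hx
    rw [List.getElem_drop] at hx'
    exact hx' ▸ hsuf (r + 1 + i) (by simp at hi; omega) (by omega)
  have hfilterN : (N.reverse).filter (fun x => x.isSome) = [] := by
    apply List.filter_eq_nil_iff.mpr
    intro x hx
    have := hNnone x (by simpa using hx)
    simp [this]
  -- fillers of arr = some v :: fillers of arr2
  have hdrop2' : arr2.drop t = M ++ none :: N := by
    rw [hdrop2, hdecomp, List.set_append, if_neg (by omega : ¬ r - t < M.length), hMlen]
    simp
  have hfillers : ((arr.drop t).reverse).filter (fun x => x.isSome)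
      = some v :: ((arr2.drop t).reverse).filter (fun x => x.isSome) := by
    rw [hdecomp, hdrop2']
    simp only [List.reverse_append, List.reverse_cons, List.filter_append, hfilterN]
    simp
  -- prefix facts for pvFill_set
  have hwt : w < (arr.take t).length := by simp; omega
  have hwtnone : (arr.take t)[w]'hwt = none := by
    rw [List.getElem_take]; exact hwnone
  have hpret : ∀ i : Nat, (hi : i < (arr.take t).length) → i < w → ((arr.take t)[i]).isSome := by
    intro i hi hlt
    rw [List.getElem_take]
    exact hpre i (by simp at hi; omega) hlt
  unfold move_right_values_to_left_alt
  simp only [hcount2, hlen2, htake2]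
  rw [← ht, hfillers, pvFill_set (arr.take t) w v _ hwt hwtnone hpret]

-- counting: when position w is None, everything past r is None and positions < w are
-- isSome, the total count is at most r (in particular w < r)
lemma count_le_r (arr : List (Option Int)) (w r : Nat)
    (hw : w < arr.countP (fun x => x.isSome)) (hr2 : r < arr.length)
    (hwnone : arr[w]'(by have := @List.countP_le_length _ (fun x : Option Int => x.isSome) arr; omega) = none)
    (hpre : ∀ i : Nat, (hi : i < arr.length) → i < w → (arr[i]).isSome)
    (hsuf : ∀ i : Nat, (hi : i < arr.length) → r < i → arr[i] = none) :
    arr.countP (fun x => x.isSome) ≤ r := by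
  have hlen := @List.countP_le_length _ (fun x : Option Int => x.isSome) arr
  have hwlen : w < arr.length := by omega
  -- count of the part past r is 0
  have hdropr : (arr.drop (r+1)).countP (fun x => x.isSome) = 0 := by
    apply List.countP_eq_zero.mpr
    intro x hx
    obtain ⟨i, hi, hx'⟩ := List.mem_iff_getElem.mp hx
    rw [List.getElem_drop] at hx'
    have hxn : x = none := hx' ▸ hsuf (r + 1 + i) (by simp at hi; omega) (by omega)
    simp [hxn]
  have hsplit : arr.countP (fun x => x.isSome) =
      (arr.take (r+1)).countP (fun x => x.isSome) + (arr.drop (r+1)).countP (fun x => x.isSome) := by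
    conv_lhs => rw [← List.take_append_drop (r+1) arr]
    exact List.countP_append
  -- if r < w the whole take (r+1) is isSome, giving count = r+1 ≤ w, contradiction
  by_cases hcase : w ≤ r
  · -- split take (r+1) at w : count ≤ w + ((r+1) - w - 1) = r since position w is none
    have h2 : (arr.take (r+1)).countP (fun x => x.isSome) =
        (arr.take w).countP (fun x => x.isSome) + ((arr.drop w).take (r+1-w)).countP (fun x => x.isSome) := by
      conv_lhs => rw [← List.take_append_drop w (arr.take (r+1))]
      rw [List.countP_append, List.take_take, min_eq_left (by omega), List.drop_take]
    have hmid : (arr.drop w).take (r+1-w) = arr[w] :: (arr.drop (w+1)).take (r-w) := by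
      rw [List.drop_eq_getElem_cons hwlen]
      rw [(by omega : r+1-w = (r-w)+1), List.take_succ_cons]
    have hmidc : ((arr.drop w).take (r+1-w)).countP (fun x => x.isSome) ≤ r - w := by
      rw [hmid, List.countP_cons, hwnone]
      have := @List.countP_le_length _ (fun x : Option Int => x.isSome) ((arr.drop (w+1)).take (r-w))
      simp at this ⊢
      omega
    have htw : (arr.take w).countP (fun x => x.isSome) ≤ w := by
      have := @List.countP_le_length _ (fun x : Option Int => x.isSome) (arr.take w)
      simp at this; omega
    omega
  · exfalso
    push_neg at hcase
    have hall : ∀ x ∈ arr.take (r+1), x.isSome := by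
      intro x hx
      obtain ⟨i, hi, hx'⟩ := List.mem_iff_getElem.mp hx
      rw [List.getElem_take] at hx'
      have : i < w := by simp at hi; omega
      exact hx' ▸ hpre i (by simp at hi; omega) this
    have hc : (arr.take (r+1)).countP (fun x => x.isSome) = (arr.take (r+1)).length :=
      List.countP_eq_length.mpr hall
    have hl : (arr.take (r+1)).length = r + 1 := by simp; omega
    omega

-- the main loop invariant
lemma aLoop_eq (fuel : Nat) : ∀ (arr : List (Option Int)) (w : Nat) (r : Int),
    w ≤ arr.countP (fun x => x.isSome) →
    (∀ i : Nat, (hi : i < arr.length) → i < w → (arr[i]).isSome) →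
    (∀ i : Nat, (hi : i < arr.length) → r < (i : Int) → arr[i] = none) →
    r < (arr.length : Int) →
    (arr.countP (fun x => x.isSome) - w) + (r + 1).toNat ≤ fuel →
    pvALoop arr (w : Int) r (arr.countP (fun x => x.isSome)) fuel = move_right_values_to_left_alt arr := by
  induction fuel with
  | zero =>
    intro arr w r hw hpre hsuf hr hfuel
    have hweq : w = arr.countP (fun x => x.isSome) := by omega
    simp only [pvALoop]
    exact (alt_fixed arr (fun i hi hlt => hpre i hi (by omega))).symm
  | succ fuel ih =>
    intro arr w r hw hpre hsuf hr hfuel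
    have hlen := @List.countP_le_length _ (fun x : Option Int => x.isSome) arr
    set t := arr.countP (fun x => x.isSome) with ht
    by_cases hguard : (w : Int) < (t : Int)
    · have hwlt : w < t := by exact_mod_cast hguard
      have hwlen : w < arr.length := by omega
      have hgw : PySem.List.pyGet? arr (w : Int) = some (arr[w]) := by
        rw [PySem.List.pyGet?_natCast]
        simp [List.getElem?_eq_getElem hwlen]
      cases hx : arr[w] with
      | some x =>
        -- write_index advance
        simp only [pvALoop, if_pos hguard, hgw, hx]
        have hcast1 : ((w : Int) + 1) = ((w + 1 : Nat) : Int) := by push_cast; ring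
        rw [hcast1]
        rw [ih arr (w+1) r (by omega)
          (fun i hi hlt => by
            by_cases hiw : i < w
            · exact hpre i hi hiw
            · have : i = w := by omega
              subst this; simp [hx])
          hsuf hr (by omega)]
      | none =>
        -- find r in range: t ≤ r
        have hrub : ∀ i : Nat, (hi : i < arr.length) → r < (i : Int) → arr[i] = none := hsuf
        -- first show r ≥ 0 via count_le_r applied to r' = min (arr.length-1) r... instead:
        -- if r < 0 then every position is none past r, so arr is all none from 0? no —
        -- positions < w are isSome; if r < (w:Int) then position w..: use count_le_r with toNat
        have hrge : (t : Int) ≤ r := by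
          by_contra hcon
          push_neg at hcon
          by_cases hr0 : 0 ≤ r
          · have hle := count_le_r arr w r.toNat hwlt (by omega) hx hpre
              (fun i hi hlt => hsuf i hi (by omega))
            omega
          · -- r < 0: every position is none, so the count is 0, contradicting w < t
            push_neg at hr0
            have hz : arr.countP (fun x => x.isSome) = 0 := by
              apply List.countP_eq_zero.mpr
              intro a ha
              obtain ⟨i, hi, hx'⟩ := List.mem_iff_getElem.mp ha
              have hxn : a = none := hx' ▸ hsuf i hi (by omega)
              simp [hxn]
            omega
        have hr2 : r.toNat < arr.length := by omega
        have hrcast : (r.toNat : Int) = r := by omega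
        have hgr : PySem.List.pyGet? arr r = some (arr[r.toNat]) := by
          rw [PySem.List.pyGet?_of_nonneg arr (show (0:Int) ≤ r by omega)]
          exact List.getElem?_eq_getElem hr2
        cases hy : arr[r.toNat] with
        | none =>
          -- skip an already-None read position
          simp only [pvALoop, if_pos hguard, hgw, hx, hgr, hy]
          rw [ih arr w (r - 1) (by omega) hpre
            (fun i hi hlt => by
              by_cases hir : (i : Int) = r
              · have : i = r.toNat := by omega
                subst this; exact hy
              · exact hsuf i hi (by omega))
            (by omega) (by omega)]
        | some v =>
          -- move: set write, clear read
          have hset1 : PySem.List.pySetD arr (w : Int) (some v) = arr.set w (some v) := by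
            simp [PySem.List.pySetD_natCast]
          have hset2 : PySem.List.pySetD (arr.set w (some v)) r none
              = (arr.set w (some v)).set r.toNat none := by
            rw [PySem.List.pySetD_of_nonneg (arr.set w (some v)) none (show (0:Int) ≤ r by omega)]
          simp only [pvALoop, if_pos hguard, hgw, hx, hgr, hy, hset1, hset2]
          set arr2 := (arr.set w (some v)).set r.toNat none with harr2
          have hle := count_le_r arr w r.toNat hwlt hr2 hx hpre
            (fun i hi hlt => hsuf i hi (by omega))
          have hwr : w < r.toNat := by omega
          have hcount2 : arr2.countP (fun x => x.isSome) = t := by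
            rw [harr2, List.countP_set (by simpa using hr2), List.countP_set (by omega)]
            simp [hx, List.getElem_set, (by omega : w ≠ r.toNat).symm, hy]
            omega
          have hlen2 : arr2.length = arr.length := by simp [harr2]
          have halt := alt_move arr w r.toNat v hwlt hle hr2 hx hy hpre
            (fun i hi hlt => hsuf i hi (by omega))
          have hcast1 : ((w : Int) + 1) = ((w + 1 : Nat) : Int) := by push_cast; ring
          rw [hcast1, ← hcount2]
          rw [ih arr2 (w+1) (r-1) (by omega)
            (fun i hi hlt => by
              have hi' : i < arr.length := by rw [← hlen2]; exact hi
              simp only [harr2, List.getElem_set]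
              by_cases hir : r.toNat = i
              · omega
              · simp only [if_neg hir]
                by_cases hiw : w = i
                · simp [hiw]
                · simp only [if_neg hiw]
                  exact hpre i hi' (by omega))
            (fun i hi hlt => by
              have hi' : i < arr.length := by rw [← hlen2]; exact hi
              simp only [harr2, List.getElem_set]
              by_cases hir : r.toNat = i
              · simp [hir]
              · simp only [if_neg hir, if_neg (by omega : ¬ w = i)]
                exact hsuf i hi' (by omega))
            (by omega) (by omega)]
          exact halt
    · -- loop guard false: w = t and the array is already B's value
      have hweq : w = t := by
        have : ¬ (w < t) := fun h => hguard (by exact_mod_cast h)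
        omega
      simp only [pvALoop, if_neg hguard]
      exact (alt_fixed arr (fun i hi hlt => hpre i hi (by omega))).symm

-- ===== VERDICT (by name: the statement is the Claim_ definition above) =====
theorem move_right_values_to_left_spec : Claim_equal_move_right_values_to_left := by
  intro array _
  unfold Spec_move_right_values_to_left move_right_values_to_left
  have hlen := @List.countP_le_length _ (fun x : Option Int => x.isSome) array
  have h := aLoop_eq (2 * array.length + 1) array 0 ((array.length : Int) - 1)
    (by omega)
    (fun i hi hlt => absurd hlt (by omega))
    (fun i hi hlt => absurd hlt (by omega))
    (by omega)
    (by omega)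
  simpa using h
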